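-- pv_equiv track=rewrite | github.com/SakshamAhlawat/indusnlp-v2 | filters/textcleaner.py | remove_line_and_before
-- ===== SOURCE A (Python) =====
-- def remove_line_and_before(text, keywords):
--     """Remove a line and the line before it if it contains a keyword."""
--     lines = text.split("\n")
--     to_remove = set()
--     for keyword in keywords:
--         for i, line in enumerate(lines):
--             if keyword in line:
--                 to_remove.add(i)
--                 if i > 0:
--                     to_remove.add(i - 1)
--     return "\n".join(
--         [line for idx, line in enumerate(lines) if idx not in to_remove]
--     )
-- ===== SOURCE B (Python) =====
-- def remove_line_and_before(text, keywords):
--     """Remove a line and the line before it if it contains a keyword."""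
--     kept = []
--     next_hit = False
--     for line in reversed(text.split("\n")):
--         hit = any(k in line for k in keywords)
--         if not hit and not next_hit:
--             kept.append(line)
--         next_hit = hit
--     return "\n".join(reversed(kept))
-- ===== Notes on version B (the rewrite author's own statement) =====
-- stated objective: alternative
-- what changed: A loops over keywords, rescanning the whole line list per keyword and accumulating a set of indices to delete, then filters by index membership; B makes a single backward pass over the lines carrying one boolean (did the following line match?), appending kept lines as it goes, with no index set.
import Mathlib
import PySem

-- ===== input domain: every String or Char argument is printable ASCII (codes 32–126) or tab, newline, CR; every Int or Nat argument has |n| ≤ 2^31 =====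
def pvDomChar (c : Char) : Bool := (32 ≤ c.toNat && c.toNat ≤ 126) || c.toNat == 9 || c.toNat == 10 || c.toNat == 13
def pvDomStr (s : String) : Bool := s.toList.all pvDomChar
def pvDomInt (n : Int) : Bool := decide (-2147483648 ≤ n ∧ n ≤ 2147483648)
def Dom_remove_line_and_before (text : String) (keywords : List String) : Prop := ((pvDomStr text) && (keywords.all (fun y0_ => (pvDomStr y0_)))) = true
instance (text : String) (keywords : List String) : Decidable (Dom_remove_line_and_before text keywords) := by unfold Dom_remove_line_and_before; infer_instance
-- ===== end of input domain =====

-- B replaces A's keyword-outer double loop + index set + membership filter by one backward pass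
-- over the lines carrying one boolean (did the following line match?), with no index set; objective: alternative.

-- ===== PORT A =====
def remove_line_and_before (text : String) (keywords : List String) : String :=
  let lines := (PySem.Str.split? text "\n").getD [text]
  let to_remove : PySem.Set Int :=
    keywords.foldl (fun tr keyword =>
      (PySem.List.enumerate lines).foldl (fun tr p =>
        if PySem.Str.isIn keyword p.2 then
          let tr := PySem.Set.add tr p.1
          if p.1 > 0 then PySem.Set.add tr (p.1 - 1) else tr
        else tr) tr) PySem.Set.empty
  PySem.Str.join "\n"
    (((PySem.List.enumerate lines).filter
        (fun p => !(PySem.Set.contains to_remove p.1))).map (fun p => p.2))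

-- ===== PORT B =====
def remove_line_and_before_alt (text : String) (keywords : List String) : String :=
  let st :=
    ((PySem.Str.split? text "\n").getD [text]).reverse.foldl
      (fun (st : List String × Bool) line =>
        let hit := keywords.any (fun k => PySem.Str.isIn k line)
        ((if !hit && !st.2 then st.1 ++ [line] else st.1), hit))
      ([], false)
  PySem.Str.join "\n" st.1.reverse

-- ===== PRECONDITION & SPEC =====
def Spec_remove_line_and_before (text : String) (keywords : List String) (out : String) : Prop := out = remove_line_and_before_alt text keywords
instance (text : String) (keywords : List String) (out : String) : Decidable (Spec_remove_line_and_before text keywords out) := by unfold Spec_remove_line_and_before; infer_instance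

-- ===== CLAIM (what is proved, stated in full; the proofs are below) =====
def Claim_equal_remove_line_and_before : Prop := ∀ (text : String) (keywords : List String), Dom_remove_line_and_before text keywords → Spec_remove_line_and_before text keywords (remove_line_and_before text keywords)

-- ===== LEMMAS AND PROOFS =====

-- "does the first line of the list match?" (false for the empty list)
def headHit (h : String → Bool) : List String → Bool
  | [] => false
  | l :: _ => h l

-- the lines both programs keep, characterised structurally
def keepLines (h : String → Bool) : List String → List String
  | [] => []
  | l :: ls => (if !h l && !headHit h ls then [l] else []) ++ keepLines h ls

theorem foldr_char (h : String → Bool) (ls : List String) :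
    ls.foldr (fun line (st : List String × Bool) =>
        ((if !h line && !st.2 then st.1 ++ [line] else st.1), h line)) ([], false)
      = ((keepLines h ls).reverse, headHit h ls) := by
  induction ls with
  | nil => simp [keepLines, headHit]
  | cons l ls ih =>
    simp only [List.foldr_cons, ih, keepLines]
    cases ls <;> simp only [headHit] <;> split <;> simp_all

theorem mem_step_fold (f : Int × String → Bool) (l : List (Int × String)) (tr : PySem.Set Int) (j : Int) :
    (j ∈ l.foldl (fun tr p =>
        if f p then
          let tr := PySem.Set.add tr p.1
          if p.1 > 0 then PySem.Set.add tr (p.1 - 1) else tr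
        else tr) tr) ↔
    j ∈ tr ∨ ∃ p ∈ l, f p ∧ (j = p.1 ∨ (p.1 > 0 ∧ j = p.1 - 1)) := by
  induction l generalizing tr with
  | nil => simp
  | cons p l ih =>
    simp only [List.foldl_cons, List.mem_cons]
    by_cases h1 : f p
    · by_cases h2 : p.1 > 0 <;>
        simp [h1, h2, ih, PySem.Set.mem_add, or_assoc]
    · simp [h1, ih]

theorem mem_keywords_fold (keywords : List String) (l : List (Int × String)) (tr : PySem.Set Int) (j : Int) :
    (j ∈ keywords.foldl (fun tr keyword =>
        l.foldl (fun tr p =>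
          if PySem.Str.isIn keyword p.2 then
            let tr := PySem.Set.add tr p.1
            if p.1 > 0 then PySem.Set.add tr (p.1 - 1) else tr
          else tr) tr) tr) ↔
    j ∈ tr ∨ ∃ k ∈ keywords, ∃ p ∈ l,
        PySem.Str.isIn k p.2 ∧ (j = p.1 ∨ (p.1 > 0 ∧ j = p.1 - 1)) := by
  induction keywords generalizing tr with
  | nil => simp
  | cons k ks ih =>
    simp only [List.foldl_cons, List.mem_cons, ih,
      mem_step_fold (fun p => PySem.Str.isIn k p.2)]
    constructor
    · rintro (h | h)
      · rcases h with h | h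
        · exact Or.inl h
        · exact Or.inr ⟨k, Or.inl rfl, h⟩
      · rcases h with ⟨k', hk', hp⟩
        exact Or.inr ⟨k', Or.inr hk', hp⟩
    · rintro (h | ⟨k', (rfl | hk'), hp⟩)
      · exact Or.inl (Or.inl h)
      · exact Or.inl (Or.inr hp)
      · exact Or.inr ⟨k', hk', hp⟩

-- filtering an enumeration by a "this or the next index matches" condition is keepLines
theorem filter_by_pred (h : String → Bool) (C : Int → Bool) :
    ∀ (suf : List String) (s : Nat),
      (∀ k, k < suf.length →
        C ((s + k : Nat) : Int)
          = (h (suf.getD k "") || (decide (k + 1 < suf.length) && h (suf.getD (k + 1) "")))) →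
      ((PySem.List.enumerate suf (s : Int)).filter (fun p => !(C p.1))).map (fun p => p.2)
        = keepLines h suf := by
  intro suf
  induction suf with
  | nil => intro s _; simp [PySem.List.enumerate_nil, keepLines]
  | cons l tl ih =>
    intro s hC
    have hCs : C ((s : Nat) : Int) = (h l || headHit h tl) := by
      have h0 := hC 0 (by simp)
      cases tl <;> simpa [headHit] using h0
    have htl : ((PySem.List.enumerate tl ((s : Int) + 1)).filter (fun p => !(C p.1))).map (fun p => p.2)
        = keepLines h tl := by
      have hcast : ((s : Int) + 1) = ((s + 1 : Nat) : Int) := by push_cast; ring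
      rw [hcast]
      apply ih (s + 1)
      intro k hk
      have := hC (k + 1) (by simpa using Nat.succ_lt_succ hk)
      simpa [Nat.add_assoc, Nat.add_comm 1 k] using this
    have hnot : (!C ((s : Nat) : Int)) = (!h l && !headHit h tl) := by
      rw [hCs]; cases h l <;> cases headHit h tl <;> rfl
    rw [PySem.List.enumerate_cons]
    simp only [List.filter_cons, hnot, keepLines]
    cases hcase : (!h l && !headHit h tl) <;> simp [htl]

-- the condition hypothesis of filter_by_pred holds for A's accumulated set
theorem contains_to_remove (keywords lines : List String) (k : Nat) (hk : k < lines.length) :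
    PySem.Set.contains
      (keywords.foldl (fun tr keyword =>
        (PySem.List.enumerate lines).foldl (fun tr p =>
          if PySem.Str.isIn keyword p.2 then
            let tr := PySem.Set.add tr p.1
            if p.1 > 0 then PySem.Set.add tr (p.1 - 1) else tr
          else tr) tr) PySem.Set.empty) ((0 + k : Nat) : Int)
      = ((fun line => keywords.any (fun kw => PySem.Str.isIn kw line)) (lines.getD k "")
         || (decide (k + 1 < lines.length)
             && (fun line => keywords.any (fun kw => PySem.Str.isIn kw line)) (lines.getD (k + 1) ""))) := by
  rw [Bool.eq_iff_iff]
  rw [PySem.Set.contains_iff, mem_keywords_fold]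
  simp only [PySem.List.mem_enumerate_iff]
  constructor
  · rintro (h | ⟨kw, hkw, q, ⟨m, hm, rfl⟩, hin, hor⟩)
    · simp at h
    · simp only [Int.zero_add] at hor ⊢
      rcases hor with h | ⟨hpos, h⟩
      · have : k = m := by exact_mod_cast by simpa using h
        subst this
        simp only [Bool.or_eq_true, Bool.and_eq_true, decide_eq_true_eq]
        left
        rw [List.getD_eq_getElem _ _ hk]
        exact List.any_eq_true.mpr ⟨kw, hkw, hin⟩
      · have hm0 : 0 < m := by exact_mod_cast hpos
        have : m = k + 1 := by
          have : (k : Int) = (m : Int) - 1 := by simpa using h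
          omega
        subst this
        simp only [Bool.or_eq_true, Bool.and_eq_true, decide_eq_true_eq]
        right
        refine ⟨hm, ?_⟩
        rw [List.getD_eq_getElem _ _ hm]
        exact List.any_eq_true.mpr ⟨kw, hkw, hin⟩
  · intro h
    simp only [Bool.or_eq_true, Bool.and_eq_true, decide_eq_true_eq] at h
    rcases h with h | ⟨hlt, h⟩
    · rw [List.getD_eq_getElem _ _ hk] at h
      rcases List.any_eq_true.mp h with ⟨kw, hkw, hin⟩
      exact Or.inr ⟨kw, hkw, ((0 : Int) + k, lines[k]), ⟨k, hk, rfl⟩, hin,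
        Or.inl (by simp)⟩
    · rw [List.getD_eq_getElem _ _ hlt] at h
      rcases List.any_eq_true.mp h with ⟨kw, hkw, hin⟩
      refine Or.inr ⟨kw, hkw, ((0 : Int) + (k + 1 : Nat), lines[k + 1]), ⟨k + 1, hlt, rfl⟩, hin,
        Or.inr ⟨by positivity, ?_⟩⟩
      push_cast
      ring

-- ===== VERDICT (by name: the statement is the Claim_ definition above) =====
theorem remove_line_and_before_spec : Claim_equal_remove_line_and_before := by
  intro text keywords _
  unfold Spec_remove_line_and_before remove_line_and_before remove_line_and_before_alt
  simp only []
  set lines := (PySem.Str.split? text "\n").getD [text] with hlines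
  set h : String → Bool := fun line => keywords.any (fun k => PySem.Str.isIn k line) with hh
  rw [List.foldl_reverse]
  have hB : lines.foldr
      (fun line (st : List String × Bool) =>
        let hit := keywords.any (fun k => PySem.Str.isIn k line)
        ((if !hit && !st.2 then st.1 ++ [line] else st.1), hit)) ([], false)
      = ((keepLines h lines).reverse, headHit h lines) := foldr_char h lines
  rw [hB]
  simp only [List.reverse_reverse]
  have hA : ((PySem.List.enumerate lines).filter
        (fun p => !(PySem.Set.contains
          (keywords.foldl (fun tr keyword =>
            (PySem.List.enumerate lines).foldl (fun tr p =>
              if PySem.Str.isIn keyword p.2 then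
                let tr := PySem.Set.add tr p.1
                if p.1 > 0 then PySem.Set.add tr (p.1 - 1) else tr
              else tr) tr) PySem.Set.empty) p.1))).map (fun p => p.2)
      = keepLines h lines := by
    rw [show (PySem.List.enumerate lines) = PySem.List.enumerate lines ((0 : Nat) : Int) by
      norm_num]
    exact filter_by_pred h _ lines 0 (fun k hk => contains_to_remove keywords lines k hk)
  rw [hA]
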